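-- pv_equiv track=rewrite | github.com/chengkai0427/SiliconValleyPythonInterview | chapter0602largest_value_of_lable.py | largest_value_of_label
-- ===== SOURCE A (Python) =====
-- from collections import defaultdict
--
-- def largest_value_of_label(value:list[int], label:list[str], num_wanted:int, use_limit:int)->int:
--     largest_sum = 0
--     dict_label = defaultdict(int)
--     for v,l in sorted(zip(value,label), reverse=True):
--         if num_wanted>0 and dict_label[l] < use_limit:
--             num_wanted -= 1
--             largest_sum += v
--             dict_label[l] += 1
--         elif not num_wanted:
--             break
--     return largest_sum
-- ===== SOURCE B (Python) =====
-- def largest_value_of_label(value, label, num_wanted, use_limit):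
--     if num_wanted <= 0 or use_limit <= 0:
--         return 0
--     buckets = {}
--     for v, l in zip(value, label):
--         buckets.setdefault(l, []).append(v)
--     candidates = []
--     for vs in buckets.values():
--         vs.sort(reverse=True)
--         candidates += vs[:use_limit]
--     candidates.sort(reverse=True)
--     return sum(candidates[:num_wanted])
-- ===== Notes on version B (the rewrite author's own statement) =====
-- stated objective: alternative
-- what changed: Replaces the single greedy scan over the fully sorted (value,label) list carrying a per-label defaultdict counter by a bucket decomposition: group values by label, keep each label's top use_limit values, then sum the num_wanted largest of those candidates.
import Mathlib
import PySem

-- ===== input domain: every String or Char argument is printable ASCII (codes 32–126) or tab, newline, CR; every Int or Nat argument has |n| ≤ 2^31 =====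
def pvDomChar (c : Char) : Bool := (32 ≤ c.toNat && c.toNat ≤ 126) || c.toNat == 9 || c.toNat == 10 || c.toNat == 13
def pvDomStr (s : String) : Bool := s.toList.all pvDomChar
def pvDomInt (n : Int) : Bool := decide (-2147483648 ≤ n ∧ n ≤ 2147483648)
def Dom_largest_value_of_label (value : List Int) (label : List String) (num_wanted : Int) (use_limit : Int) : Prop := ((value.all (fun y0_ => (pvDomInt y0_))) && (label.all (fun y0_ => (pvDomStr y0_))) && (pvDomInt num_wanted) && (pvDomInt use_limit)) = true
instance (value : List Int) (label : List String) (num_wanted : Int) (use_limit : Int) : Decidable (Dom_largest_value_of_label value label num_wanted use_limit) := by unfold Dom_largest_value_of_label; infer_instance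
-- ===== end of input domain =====

-- B replaces A's single greedy scan over the fully sorted (value,label) list with a bucket
-- decomposition (per-label top-use_limit candidates, then the num_wanted largest of those);
-- same cost class, genuinely different algorithm (objective: alternative).

-- ===== PORT A =====
-- the loop: for v,l in sorted(zip(value,label), reverse=True): … (defaultdict read materializes the key: setdefault)
def goA (k : Int) : List (Int × String) → Int → PySem.Dict String Int → Int → Int
  | [], _, _, s => s
  | (v, l) :: rest, w, d, s =>
    if w > 0 then
      if (d.setdefault l 0).getD l 0 < k then
        goA k rest (w - 1) ((d.setdefault l 0).insert l ((d.setdefault l 0).getD l 0 + 1)) (s + v)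
      else goA k rest w (d.setdefault l 0) s
    else if w = 0 then s
    else goA k rest w d s

def largest_value_of_label (value : List Int) (label : List String) (num_wanted : Int) (use_limit : Int) : Int :=
  goA use_limit (PySem.List.sorted2 (value.zip label) Prod.fst Prod.snd true) num_wanted PySem.Dict.empty 0

-- ===== PORT B =====
def largest_value_of_label_alt (value : List Int) (label : List String) (num_wanted : Int) (use_limit : Int) : Int :=
  if num_wanted ≤ 0 ∨ use_limit ≤ 0 then 0
  else
    let buckets := (value.zip label).foldl
      (fun d p => d.modify p.2 [] (fun vs => vs ++ [p.1])) PySem.Dict.empty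
    let candidates := buckets.values.foldl
      (fun acc vs => acc ++ PySem.List.slice (PySem.List.sorted vs (fun x => x) true) none (some use_limit)) []
    (PySem.List.slice (PySem.List.sorted candidates (fun x => x) true) none (some num_wanted)).sum

-- ===== PRECONDITION & SPEC =====
def Spec_largest_value_of_label (value : List Int) (label : List String) (num_wanted : Int) (use_limit : Int) (out : Int) : Prop := out = largest_value_of_label_alt value label num_wanted use_limit
instance (value : List Int) (label : List String) (num_wanted : Int) (use_limit : Int) (out : Int) : Decidable (Spec_largest_value_of_label value label num_wanted use_limit out) := by unfold Spec_largest_value_of_label; infer_instance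

-- ===== CLAIM (what is proved, stated in full; the proofs are below) =====
def Claim_equal_largest_value_of_label : Prop := ∀ (value : List Int) (label : List String) (num_wanted : Int) (use_limit : Int), Dom_largest_value_of_label value label num_wanted use_limit → Spec_largest_value_of_label value label num_wanted use_limit (largest_value_of_label value label num_wanted use_limit)

-- ===== LEMMAS AND PROOFS =====

-- the items A's greedy loop takes, tracked with a per-label count function
def selP (k : Int) : List (Int × String) → (String → Int) → List (Int × String)
  | [], _ => []
  | (v, l) :: r, c =>
    if c l < k then (v, l) :: selP k r (fun l' => if l' = l then c l + 1 else c l')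
    else selP k r c

-- the tuple-descending "before" relation sorted2 … true uses
def beforeRel (a b : Int × String) : Bool :=
  decide (b.1 < a.1) || (!decide (a.1 < b.1) && decide (b.2 < a.2))

lemma beforeRel_iff (a b : Int × String) :
    beforeRel a b = true ↔ (b.1 < a.1 ∨ (¬ a.1 < b.1 ∧ b.2 < a.2)) := by
  simp [beforeRel]

lemma beforeRel_asym (a b : Int × String) (h : beforeRel a b = true) : beforeRel b a = false := by
  rw [Bool.eq_false_iff]
  intro hc
  rw [beforeRel_iff] at h hc
  rcases h with h1 | ⟨h2a, h2b⟩ <;> rcases hc with g1 | ⟨g2a, g2b⟩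
  · omega
  · omega
  · omega
  · exact absurd g2b (lt_asymm h2b)

lemma beforeRel_trans (a b c : Int × String)
    (h1 : beforeRel a b = true) (h2 : beforeRel b c = true) : beforeRel a c = true := by
  rw [beforeRel_iff] at h1 h2 ⊢
  rcases h1 with h1 | ⟨h1a, h1b⟩ <;> rcases h2 with h2 | ⟨h2a, h2b⟩
  · left; omega
  · left; omega
  · left; omega
  · right; exact ⟨by omega, lt_trans h2b h1b⟩

lemma pairwise_insertBy_inv {α : Type} (before : α → α → Bool)
    (hasym : ∀ a b, before a b = true → before b a = false)
    (htrans : ∀ a b c, before a b = true → before b c = true → before a c = true)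
    (x : α) (acc : List α) (h : acc.Pairwise (fun a b => before b a = false)) :
    (PySem.List.insertBy before x acc).Pairwise (fun a b => before b a = false) := by
  induction acc with
  | nil => simp [PySem.List.insertBy]
  | cons y ys ih =>
    rcases List.pairwise_cons.mp h with ⟨hy, hys⟩
    simp only [PySem.List.insertBy]
    by_cases hxy : before x y = true
    · rw [if_pos hxy]
      refine List.pairwise_cons.mpr ⟨?_, h⟩
      intro z hz
      rcases List.mem_cons.mp hz with rfl | hzys
      · exact hasym _ _ hxy
      · rw [Bool.eq_false_iff]
        intro hzx
        have hzy : before z y = true := htrans _ _ _ hzx hxy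
        have := hy z hzys
        simp_all
    · rw [if_neg hxy]
      refine List.pairwise_cons.mpr ⟨?_, ih hys⟩
      intro z hz
      rcases (PySem.List.mem_insertBy before x z ys).mp hz with rfl | hzys
      · exact Bool.eq_false_iff.mpr hxy
      · exact hy z hzys

lemma pairwise_foldl_insertBy {α : Type} (before : α → α → Bool)
    (hasym : ∀ a b, before a b = true → before b a = false)
    (htrans : ∀ a b c, before a b = true → before b c = true → before a c = true)
    (l : List α) : ∀ (acc : List α), acc.Pairwise (fun a b => before b a = false) →
    (l.foldl (fun acc x => PySem.List.insertBy before x acc) acc).Pairwise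
      (fun a b => before b a = false) := by
  induction l with
  | nil => intro acc h; simpa using h
  | cons x xs ih =>
    intro acc h
    exact ih _ (pairwise_insertBy_inv before hasym htrans x acc h)

lemma sorted2_eq_foldl (zs : List (Int × String)) :
    PySem.List.sorted2 zs Prod.fst Prod.snd true =
      zs.foldl (fun acc x => PySem.List.insertBy beforeRel x acc) [] := rfl

lemma sorted2_pairwise_before (zs : List (Int × String)) :
    (PySem.List.sorted2 zs Prod.fst Prod.snd true).Pairwise (fun a b => beforeRel b a = false) := by
  rw [sorted2_eq_foldl]
  exact pairwise_foldl_insertBy beforeRel beforeRel_asym beforeRel_trans zs [] (by simp)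

lemma sorted2_pairwise_fst (zs : List (Int × String)) :
    (PySem.List.sorted2 zs Prod.fst Prod.snd true).Pairwise (fun a b => b.1 ≤ a.1) := by
  refine (sorted2_pairwise_before zs).imp ?_
  intro a b h
  by_contra hc
  have hT : beforeRel b a = true := (beforeRel_iff b a).mpr (Or.inl (by omega))
  rw [h] at hT
  exact Bool.false_ne_true hT

-- goA in terms of selP
lemma goA_eq (k : Int) (L : List (Int × String)) : ∀ (w : Int) (d : PySem.Dict String Int) (s : Int),
    goA k L w d s = s + (((selP k L (fun l => d.getD l 0)).map Prod.fst).take w.toNat).sum := by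
  induction L with
  | nil => intro w d s; simp [goA, selP]
  | cons p r ih =>
    obtain ⟨v, l⟩ := p
    intro w d s
    have ecount : (fun l' => (d.setdefault l 0).getD l' 0) = (fun l' => d.getD l' 0) := by
      funext l'
      by_cases h : l' = l
      · subst h; exact PySem.Dict.getD_setdefault_self d l' 0 0
      · simp [PySem.Dict.getD, PySem.Dict.get?_setdefault_of_ne d 0 h]
    by_cases hw : w > 0
    · by_cases hc : d.getD l 0 < k
      · have hc' : (d.setdefault l 0).getD l 0 < k := by
          rw [PySem.Dict.getD_setdefault_self]; exact hc
        have einsert : (fun l' => (((d.setdefault l 0)).insert l ((d.setdefault l 0).getD l 0 + 1)).getD l' 0)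
            = (fun l' => if l' = l then d.getD l 0 + 1 else d.getD l' 0) := by
          funext l'
          rw [PySem.Dict.getD_insert, PySem.Dict.getD_setdefault_self]
          by_cases h : l' = l
          · simp [h]
          · simp [h, PySem.Dict.getD, PySem.Dict.get?_setdefault_of_ne d 0 h]
        have hsel : selP k ((v, l) :: r) (fun l' => d.getD l' 0)
            = (v, l) :: selP k r (fun l' => if l' = l then d.getD l 0 + 1 else d.getD l' 0) := by
          simp only [selP]
          rw [if_pos hc]
        rw [hsel]
        have hgo : goA k ((v, l) :: r) w d s
            = goA k r (w - 1) ((d.setdefault l 0).insert l ((d.setdefault l 0).getD l 0 + 1)) (s + v) := by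
          simp only [goA]
          rw [if_pos hw, if_pos hc']
        rw [hgo, ih, einsert]
        have htn : w.toNat = (w - 1).toNat + 1 := by omega
        rw [htn, List.map_cons, List.take_succ_cons, List.sum_cons]
        ring
      · have hc' : ¬ (d.setdefault l 0).getD l 0 < k := by
          rw [PySem.Dict.getD_setdefault_self]; exact hc
        have hsel : selP k ((v, l) :: r) (fun l' => d.getD l' 0)
            = selP k r (fun l' => d.getD l' 0) := by
          simp only [selP]
          rw [if_neg hc]
        have hgo : goA k ((v, l) :: r) w d s = goA k r w (d.setdefault l 0) s := by
          simp only [goA]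
          rw [if_pos hw, if_neg hc']
        rw [hgo, ih, ecount, hsel]
    · have htn : w.toNat = 0 := by omega
      by_cases hw0 : w = 0
      · have hgo : goA k ((v, l) :: r) w d s = s := by
          simp only [goA]
          rw [if_neg hw, if_pos hw0]
        rw [hgo, htn]
        simp
      · have hgo : goA k ((v, l) :: r) w d s = goA k r w d s := by
          simp only [goA]
          rw [if_neg hw, if_neg hw0]
        rw [hgo, ih, htn]
        simp

-- selP picks, per label, the first (k - count) pairs with that label
lemma selP_filter (k : Int) (L : List (Int × String)) : ∀ (c : String → Int) (l : String),
    (selP k L c).filter (fun p => p.2 == l) =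
      ((L.filter (fun p => p.2 == l)).take (k - c l).toNat) := by
  induction L with
  | nil => intro c l; simp [selP]
  | cons p r ih =>
    obtain ⟨v, l0⟩ := p
    intro c l
    by_cases hc : c l0 < k
    · have hsel : selP k ((v, l0) :: r) c
          = (v, l0) :: selP k r (fun l' => if l' = l0 then c l0 + 1 else c l') := by
        simp only [selP]; rw [if_pos hc]
      rw [hsel]
      by_cases hl : l0 = l
      · subst hl
        have h1 : (k - c l0).toNat = (k - (c l0 + 1)).toNat + 1 := by omega
        simp only [List.filter_cons, beq_self_eq_true, if_pos]
        rw [ih, h1]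
        simp [List.take_succ_cons]
      · have hne : (l0 == l) = false := by simp [hl]
        simp only [List.filter_cons, hne]
        rw [ih]
        simp [Ne.symm hl]
    · have hsel : selP k ((v, l0) :: r) c = selP k r c := by
        simp only [selP]; rw [if_neg hc]
      rw [hsel]
      by_cases hl : l0 = l
      · subst hl
        have h0 : (k - c l0).toNat = 0 := by omega
        simp only [List.filter_cons, beq_self_eq_true, if_pos]
        rw [ih, h0]
        simp
      · have hne : (l0 == l) = false := by simp [hl]
        simp only [List.filter_cons, hne]
        exact ih c l
  
lemma selP_sublist (k : Int) (L : List (Int × String)) : ∀ (c : String → Int),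
    (selP k L c).Sublist L := by
  induction L with
  | nil => intro c; simp [selP]
  | cons p r ih =>
    obtain ⟨v, l⟩ := p
    intro c
    simp only [selP]
    by_cases hc : c l < k
    · rw [if_pos hc]; exact (ih _).cons₂ _
    · rw [if_neg hc]; exact (ih _).cons _

lemma selP_nil_of_nonpos (k : Int) (hk : k ≤ 0) (L : List (Int × String)) :
    ∀ (c : String → Int), (∀ l, 0 ≤ c l) → selP k L c = [] := by
  induction L with
  | nil => intro c _; simp [selP]
  | cons p r ih =>
    obtain ⟨v, l⟩ := p
    intro c hc
    simp only [selP]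
    rw [if_neg (by have := hc l; omega)]
    exact ih c hc

-- partition of a pair list by its labels, over any Nodup superset of its labels
lemma count_flatMap_filter (p : Int × String) (X : List (Int × String)) :
    ∀ (U : List String), U.Nodup → p.2 ∈ U →
    (U.flatMap (fun l => X.filter (fun q => q.2 == l))).count p = X.count p := by
  intro U
  induction U with
  | nil => intro _ h; simp at h
  | cons u U' ih =>
    intro hnd hmem
    rcases List.nodup_cons.mp hnd with ⟨hu, hnd'⟩
    rw [List.flatMap_cons, List.count_append]
    by_cases he : u = p.2
    · have h1 : (X.filter (fun q => q.2 == u)).count p = X.count p :=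
        List.count_filter (by simp [he])
      have h2 : (U'.flatMap (fun l => X.filter (fun q => q.2 == l))).count p = 0 := by
        rw [List.count_eq_zero]
        intro hpm
        rcases List.mem_flatMap.mp hpm with ⟨l, hl, hpl⟩
        have hpe : p.2 = l := beq_iff_eq.mp (List.mem_filter.mp hpl).2
        rw [he] at hu
        exact hu (by rw [hpe]; exact hl)
      omega
    · have h1 : (X.filter (fun q => q.2 == u)).count p = 0 := by
        rw [List.count_eq_zero]
        intro hpm
        rcases List.mem_filter.mp hpm with ⟨_, he2⟩
        exact he (beq_iff_eq.mp he2).symm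
      have hmem' : p.2 ∈ U' := by
        rcases List.mem_cons.mp hmem with h | h
        · exact absurd h.symm he
        · exact h
      rw [h1, ih hnd' hmem']
      omega

lemma perm_flatMap_filter (X : List (Int × String)) (U : List String)
    (hnd : U.Nodup) (hsub : ∀ p ∈ X, p.2 ∈ U) :
    X.Perm (U.flatMap (fun l => X.filter (fun q => q.2 == l))) := by
  rw [List.perm_iff_count]
  intro p
  by_cases hp : p ∈ X
  · exact (count_flatMap_filter p X U hnd (hsub p hp)).symm
  · rw [List.count_eq_zero_of_not_mem hp]
    symm
    rw [List.count_eq_zero]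
    intro hpm
    rcases List.mem_flatMap.mp hpm with ⟨l, _, hpl⟩
    exact hp (List.mem_filter.mp hpl).1

-- descending value lists that are permutations are equal
lemma eq_of_perm_of_pairwise_ge {l₁ l₂ : List Int} (hperm : l₁.Perm l₂)
    (h1 : l₁.Pairwise (fun a b => b ≤ a)) (h2 : l₂.Pairwise (fun a b => b ≤ a)) : l₁ = l₂ := by
  refine PySem.List.eq_of_perm_of_pairwise_le_of_injective (fun x : Int => -x) neg_injective hperm ?_ ?_
  · exact h1.imp (by intro a b h; dsimp only; omega)
  · exact h2.imp (by intro a b h; dsimp only; omega)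

-- the label-filtered slice of the sorted pair list is the descending sort of that label's bucket
lemma filter_sorted2_eq (zs : List (Int × String)) (l : String) :
    (((PySem.List.sorted2 zs Prod.fst Prod.snd true).filter (fun p => p.2 == l)).map Prod.fst)
      = PySem.List.sorted ((zs.filter (fun p => p.2 == l)).map Prod.fst) (fun x => x) true := by
  refine eq_of_perm_of_pairwise_ge ?_ ?_ ?_
  · exact ((PySem.List.sorted2_perm zs Prod.fst Prod.snd true).filter _ |>.map _).trans
      (PySem.List.sorted_perm _ _ _).symm
  · have hpw := sorted2_pairwise_fst zs
    have hsub := (List.filter_sublist (l := PySem.List.sorted2 zs Prod.fst Prod.snd true)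
      (p := fun p => p.2 == l))
    have := hpw.sublist hsub
    exact List.pairwise_map.mpr (this.imp (fun h => h))
  · exact PySem.List.sorted_pairwise_rev _ _

-- ===== the main equivalence =====
theorem largest_value_of_label_spec : Claim_equal_largest_value_of_label := by
  intro value label num_wanted use_limit _
  unfold Spec_largest_value_of_label
  simp only [largest_value_of_label, largest_value_of_label_alt]
  set zs := value.zip label with hzs
  set L := PySem.List.sorted2 zs Prod.fst Prod.snd true with hL
  have hempty : (fun l => (PySem.Dict.empty (κ := String) (ν := Int)).getD l 0) = (fun _ => (0 : Int)) := rfl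
  rw [goA_eq, hempty]
  set X := selP use_limit L (fun _ => (0 : Int)) with hX
  by_cases h0 : num_wanted ≤ 0 ∨ use_limit ≤ 0
  · rw [if_pos h0]
    rcases h0 with h | h
    · have : num_wanted.toNat = 0 := by omega
      simp [this]
    · rw [hX, selP_nil_of_nonpos use_limit h L (fun _ => 0) (fun _ => le_refl 0)]
      simp
  · rw [if_neg h0]
    have hw : 0 < num_wanted := by omega
    have hk : 0 < use_limit := by omega
    -- buckets structure
    set buckets := zs.foldl (fun d p => d.modify p.2 [] (fun vs => vs ++ [p.1]))
      (PySem.Dict.empty (κ := String) (ν := List Int)) with hbk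
    have hb : buckets = (zs.map Prod.swap).foldl
        (fun d p => d.modify p.1 [] (fun vs => vs ++ [p.2])) PySem.Dict.empty := by
      rw [hbk, List.foldl_map]
      simp [Prod.swap]
    have hgetD : ∀ l, buckets.getD l [] = (zs.filter (fun p => p.2 == l)).map Prod.fst := by
      intro l
      rw [hb, PySem.Dict.getD_foldl_modify_append]
      simp [List.filter_map, List.map_map, Function.comp_def, Prod.swap,
        PySem.Dict.getD, PySem.Dict.empty, PySem.Dict.get?]
    have hkeys : buckets.keys = PySem.Set.ofList (zs.map (fun p => p.2)) := by
      rw [hb, PySem.Dict.keys_foldl_modify_key]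
      simp [PySem.Set.update, PySem.Set.ofList, List.map_map, Function.comp_def, Prod.swap,
        PySem.Dict.empty, PySem.Dict.keys]
    have hnodup : buckets.keys.Nodup := by
      rw [hkeys]; exact PySem.Set.nodup_ofList _
    have hvalues : buckets.values = buckets.keys.map (fun l => buckets.getD l []) :=
      PySem.Dict.values_eq_map_keys buckets hnodup []
    set U := PySem.Set.ofList (zs.map (fun p => p.2)) with hU
    -- candidates as a flatMap over the distinct labels
    have hcand : buckets.values.foldl
        (fun acc vs => acc ++ PySem.List.slice (PySem.List.sorted vs (fun x => x) true) none (some use_limit)) []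
        = U.flatMap (fun l =>
            (PySem.List.sorted ((zs.filter (fun p => p.2 == l)).map Prod.fst) (fun x => x) true).take use_limit.toNat) := by
      rw [PySem.List.foldl_append_eq_flatMap, List.nil_append, hvalues, hkeys]
      have hfun : (fun l => buckets.getD l []) = (fun l => (zs.filter (fun p => p.2 == l)).map Prod.fst) :=
        funext hgetD
      rw [hfun, List.flatMap_map]
      congr 1
      funext l
      rw [PySem.List.slice_to _ (by omega)]
    rw [hcand]
    -- relate to the A-side selection
    have hXfil : ∀ l, (X.filter (fun p => p.2 == l)).map Prod.fst
        = (PySem.List.sorted ((zs.filter (fun p => p.2 == l)).map Prod.fst) (fun x => x) true).take use_limit.toNat := by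
      intro l
      rw [hX, selP_filter]
      rw [List.map_take, filter_sorted2_eq]
      congr 1
      omega
    have hXperm : (X.map Prod.fst).Perm
        (U.flatMap (fun l =>
          (PySem.List.sorted ((zs.filter (fun p => p.2 == l)).map Prod.fst) (fun x => x) true).take use_limit.toNat)) := by
      have hsubl : ∀ p ∈ X, p.2 ∈ U := by
        intro p hp
        have hpL : p ∈ L := (selP_sublist use_limit L _).subset hp
        have hpzs : p ∈ zs := (PySem.List.sorted2_perm zs Prod.fst Prod.snd true).subset hpL
        rw [hU, PySem.Set.mem_ofList]
        exact List.mem_map.mpr ⟨p, hpzs, rfl⟩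
      have h1 := perm_flatMap_filter X U (PySem.Set.nodup_ofList _) hsubl
      have h2 := h1.map Prod.fst
      rw [List.map_flatMap] at h2
      refine h2.trans ?_
      refine List.Perm.flatMap (List.Perm.refl U) ?_
      intro l _
      rw [hXfil l]
    have hXpw : (X.map Prod.fst).Pairwise (fun a b => b ≤ a) := by
      have := (sorted2_pairwise_fst zs).sublist (selP_sublist use_limit L (fun _ => (0 : Int)))
      exact List.pairwise_map.mpr (this.imp (fun h => h))
    have hsortcand : PySem.List.sorted
        (U.flatMap (fun l =>
          (PySem.List.sorted ((zs.filter (fun p => p.2 == l)).map Prod.fst) (fun x => x) true).take use_limit.toNat))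
        (fun x => x) true = X.map Prod.fst := by
      refine eq_of_perm_of_pairwise_ge ?_ ?_ hXpw
      · exact (PySem.List.sorted_perm _ _ _).trans hXperm.symm
      · exact PySem.List.sorted_pairwise_rev _ _
    rw [hsortcand, PySem.List.slice_to _ (by omega)]
    omega
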